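-- pv_equiv track=rewrite | github.com/disooqi/ADP-pipeline | pipelines/common/extract_CMs_from_hypotheses.py | isLinkedbyParse
-- ===== SOURCE A (Python) =====
-- def isLinkedbyParse(v1,v2,word_props,equalities,been):
-- 	if (v1,v2) in been: return 0
-- 	been.append((v1,v2))
-- 	been.append((v2,v1))
--
-- 	#if equalities.has_key(v1) and equalities[v1].has_key(v2): return 2
--
-- 	for (propName,args) in word_props:
-- 		if v1 in args and v2 in args: return 2
--
-- 	for (propName,args) in word_props:
-- 		if v1 in args:
-- 			if len(args)>2:
-- 				i1 = args.index(v1)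
-- 				if i1==0:
-- 					if isLinkedbyParse(args[1],v2,word_props,equalities,been)>0: return 1
-- 					if isLinkedbyParse(args[2],v2,word_props,equalities,been)>0: return 1
-- 					if len(args)>3 and isLinkedbyParse(args[3],v2,word_props,equalities,been)>0: return 1
-- 				elif i1==1:
-- 					if isLinkedbyParse(args[0],v2,word_props,equalities,been)>0: return 1
-- 					if isLinkedbyParse(args[2],v2,word_props,equalities,been)>0: return 1
-- 					if len(args)>3 and isLinkedbyParse(args[3],v2,word_props,equalities,been)>0: return 1
-- 				elif i1==2:
-- 					if isLinkedbyParse(args[0],v2,word_props,equalities,been)>0: return 1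
-- 					if isLinkedbyParse(args[1],v2,word_props,equalities,been)>0: return 1
-- 					if len(args)>3 and isLinkedbyParse(args[3],v2,word_props,equalities,been)>0: return 1
-- 				elif i1==3:
-- 					if isLinkedbyParse(args[0],v2,word_props,equalities,been)>0: return 1
-- 					if isLinkedbyParse(args[1],v2,word_props,equalities,been)>0: return 1
-- 					if isLinkedbyParse(args[2],v2,word_props,equalities,been)>0: return 1
-- 		elif v2 in args:
-- 			if len(args)>2:
-- 				i2 = args.index(v2)
-- 				if i2==0:
-- 					if isLinkedbyParse(args[1],v1,word_props,equalities,been)>0: return 1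
-- 					if isLinkedbyParse(args[2],v1,word_props,equalities,been)>0: return 1
-- 					if len(args)>3 and isLinkedbyParse(args[3],v1,word_props,equalities,been)>0: return 1
-- 				elif i2==1:
-- 					if isLinkedbyParse(args[0],v1,word_props,equalities,been)>0: return 1
-- 					if isLinkedbyParse(args[2],v1,word_props,equalities,been)>0: return 1
-- 					if len(args)>3 and isLinkedbyParse(args[3],v1,word_props,equalities,been)>0: return 1
-- 				elif i2==2:
-- 					if isLinkedbyParse(args[0],v1,word_props,equalities,been)>0: return 1
-- 					if isLinkedbyParse(args[1],v1,word_props,equalities,been)>0: return 1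
-- 					if len(args)>3 and isLinkedbyParse(args[3],v1,word_props,equalities,been)>0: return 1
-- 				elif i2==3:
-- 					if isLinkedbyParse(args[0],v1,word_props,equalities,been)>0: return 1
-- 					if isLinkedbyParse(args[1],v1,word_props,equalities,been)>0: return 1
-- 					if isLinkedbyParse(args[2],v1,word_props,equalities,been)>0: return 1
--
-- 	return 0
-- ===== SOURCE B (Python) =====
-- # B: iterative DFS with an explicit stack over ordered word pairs, a hash-set
-- # 'visited' replacing A's linear scans of the 'been' list, and per-prop data
-- # (membership set, first-four slots) prebuilt once instead of rescanned.
-- # B performs the same in-place appends to 'been' as A (same pairs, same order).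
-- def isLinkedbyParse(v1, v2, word_props, equalities, been):
--     visited = set(been)
--     if (v1, v2) in visited:
--         return 0
--     plist = [(set(args), len(args) > 2, args[:4]) for _, args in word_props]
--
--     def scan(x, y):
--         # None = some prop contains both x and y; else the next pairs, in A's order
--         children = []
--         for argset, big, slots in plist:
--             if x in argset:
--                 if y in argset:
--                     return None
--                 if big and x in slots:
--                     i = slots.index(x)
--                     children += [(slots[j], y) for j in range(len(slots)) if j != i]
--             elif y in argset:
--                 if big and y in slots:
--                     i = slots.index(y)
--                     children += [(slots[j], x) for j in range(len(slots)) if j != i]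
--         return children
--
--     root = scan(v1, v2)
--     visited.add((v1, v2)); visited.add((v2, v1))
--     been.append((v1, v2)); been.append((v2, v1))
--     if root is None:
--         return 2
--     stack = list(reversed(root))
--     while stack:
--         p = stack.pop()
--         if p in visited:
--             continue
--         q = (p[1], p[0])
--         visited.add(p); visited.add(q)
--         been.append(p); been.append(q)
--         r = scan(p[0], p[1])
--         if r is None:
--             return 1
--         stack.extend(reversed(r))
--     return 0
-- ===== Notes on version B (the rewrite author's own statement) =====
-- stated objective: alternative
-- what changed: A is a recursive DFS that rescans word_props twice and the growing `been` list linearly on every call; B prebuilds per-prop data (membership set, first-four slots) once and runs an explicit-stack DFS over ordered word pairs with a hash-set of visited pairs and a single combined scan per pair; it trades A's per-call linear scans for upfront preprocessing, which is not measurably faster on the generated inputs.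
import Mathlib
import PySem

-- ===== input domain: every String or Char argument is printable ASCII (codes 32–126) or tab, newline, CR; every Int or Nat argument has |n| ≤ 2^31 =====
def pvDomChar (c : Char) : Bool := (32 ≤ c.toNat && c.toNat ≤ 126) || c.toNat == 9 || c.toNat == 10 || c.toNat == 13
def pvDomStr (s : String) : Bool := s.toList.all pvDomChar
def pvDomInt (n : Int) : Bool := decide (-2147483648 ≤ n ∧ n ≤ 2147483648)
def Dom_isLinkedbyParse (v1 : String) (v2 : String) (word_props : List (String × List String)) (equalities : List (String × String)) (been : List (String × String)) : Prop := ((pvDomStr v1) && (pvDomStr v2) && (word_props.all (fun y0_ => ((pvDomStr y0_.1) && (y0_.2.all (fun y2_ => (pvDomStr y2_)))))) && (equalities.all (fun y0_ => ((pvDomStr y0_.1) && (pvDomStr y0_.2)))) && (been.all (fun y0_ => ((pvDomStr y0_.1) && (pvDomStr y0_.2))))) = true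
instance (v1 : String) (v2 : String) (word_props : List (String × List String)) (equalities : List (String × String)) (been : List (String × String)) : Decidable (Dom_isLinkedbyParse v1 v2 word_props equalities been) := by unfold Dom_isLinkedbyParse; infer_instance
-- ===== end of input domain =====

-- B replaces A's recursive DFS (which rescans word_props and the growing `been`
-- list on every call) by an explicit-stack DFS over prebuilt per-prop data with a
-- hash-set `visited`; equivalence proved for the RETURN VALUE (both Pythons also
-- perform the identical in-place appends to `been`).

-- ===== PORT A =====
-- The recursive calls A's second loop makes for one prop's `args`, in A's order
-- (args[j] is guarded by the same length tests as in A; getD's default is never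
-- reached under those guards).
def callsA (a b : String) (args : List String) : List (String × String) :=
  if args.contains a then
    if 2 < args.length then
      match PySem.List.index? args a with
      | some 0 => [(args.getD 1 "", b), (args.getD 2 "", b)] ++ (if 3 < args.length then [(args.getD 3 "", b)] else [])
      | some 1 => [(args.getD 0 "", b), (args.getD 2 "", b)] ++ (if 3 < args.length then [(args.getD 3 "", b)] else [])
      | some 2 => [(args.getD 0 "", b), (args.getD 1 "", b)] ++ (if 3 < args.length then [(args.getD 3 "", b)] else [])
      | some 3 => [(args.getD 0 "", b), (args.getD 1 "", b), (args.getD 2 "", b)]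
      | _ => []
    else []
  else if args.contains b then
    if 2 < args.length then
      match PySem.List.index? args b with
      | some 0 => [(args.getD 1 "", a), (args.getD 2 "", a)] ++ (if 3 < args.length then [(args.getD 3 "", a)] else [])
      | some 1 => [(args.getD 0 "", a), (args.getD 2 "", a)] ++ (if 3 < args.length then [(args.getD 3 "", a)] else [])
      | some 2 => [(args.getD 0 "", a), (args.getD 1 "", a)] ++ (if 3 < args.length then [(args.getD 3 "", a)] else [])
      | some 3 => [(args.getD 0 "", a), (args.getD 1 "", a), (args.getD 2 "", a)]
      | _ => []
    else []
  else []

-- A's recursion, with Python's shared mutable `been` threaded explicitly and a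
-- fuel guard making the recursion total (the top-level fuel provably suffices).
mutual
def goA (fuel : Nat) (v1 v2 : String) (props : List (String × List String)) (been : List (String × String)) : Int × List (String × String) :=
  match fuel with
  | 0 => (0, been)
  | fuel + 1 =>
    if (v1, v2) ∈ been then (0, been)
    else
      -- Python appends the two marks before the shared-prop loop; inlined here
      if props.any (fun p => p.2.contains v1 && p.2.contains v2) then (2, been ++ [(v1, v2), (v2, v1)])
      else loopA fuel v1 v2 props props (been ++ [(v1, v2), (v2, v1)])
  termination_by (fuel, 0, 0)
-- A's second `for (propName,args) in word_props` loop
def loopA (fuel : Nat) (v1 v2 : String) (props rem : List (String × List String)) (been : List (String × String)) : Int × List (String × String) :=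
  match rem with
  | [] => (0, been)
  | p :: rest =>
    match seqA fuel props (callsA v1 v2 p.2) been with
    | (r, been') => if r > 0 then (1, been') else loopA fuel v1 v2 props rest been'
  termination_by (fuel, 2, rem.length)
-- A's chain `if isLinkedbyParse(..)>0: return 1; if isLinkedbyParse(..)>0: return 1; ...`
def seqA (fuel : Nat) (props : List (String × List String)) (calls : List (String × String)) (been : List (String × String)) : Int × List (String × String) :=
  match calls with
  | [] => (0, been)
  | (a, b) :: rest =>
    match goA fuel a b props been with
    | (r, been') => if r > 0 then (1, been') else seqA fuel props rest been'
  termination_by (fuel, 1, calls.length)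
end

def isLinkedbyParse (v1 : String) (v2 : String) (word_props : List (String × List String)) (equalities : List (String × String)) (been : List (String × String)) : Int :=
  let S := word_props.foldl (fun n p => n + p.2.length) 0
  (goA ((S + 3) * (S + 3) + 2) v1 v2 word_props been).1

-- ===== PORT B =====
-- per-prop prebuilt data: (membership set, len(args) > 2, args[:4])
def preB (p : String × List String) : PySem.Set String × Bool × List String :=
  (PySem.Set.ofList p.2, decide (2 < p.2.length), p.2.take 4)

-- [(slots[j], other) for j in range(len(slots)) if j != i]
def slotPairs (i : Nat) (slots : List String) (other : String) : List (String × String) :=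
  ((List.range slots.length).filter (fun j => j ≠ i)).map (fun j => (slots.getD j "", other))

-- Source B's scan(x, y): none = some prop contains both; some cs = the next pairs
def scanB (x y : String) (plist : List (PySem.Set String × Bool × List String)) (acc : List (String × String)) : Option (List (String × String)) :=
  match plist with
  | [] => some acc
  | (argset, big, slots) :: rest =>
    if PySem.Set.contains argset x then
      if PySem.Set.contains argset y then none
      else scanB x y rest (acc ++ (if big && slots.contains x then
              match PySem.List.index? slots x with
              | some i => slotPairs i slots y
              | none => []
            else []))
    else if PySem.Set.contains argset y then
      scanB x y rest (acc ++ (if big && slots.contains y then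
              match PySem.List.index? slots y with
              | some i => slotPairs i slots x
              | none => []
            else []))
    else scanB x y rest acc

-- Source B's while loop; the Python stack pops from the end and extends with
-- reversed children, which is this front-of-list form; fuel provably suffices.
def runB (fuel : Nat) (plist : List (PySem.Set String × Bool × List String)) (stack : List (String × String)) (visited : PySem.Set (String × String)) : Int :=
  match fuel with
  | 0 => 0
  | fuel + 1 =>
    match stack with
    | [] => 0
    | p :: rest =>
      if PySem.Set.contains visited p then runB fuel plist rest visited
      else
        let visited := PySem.Set.add (PySem.Set.add visited p) (p.2, p.1)
        match scanB p.1 p.2 plist [] with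
        | none => 1
        | some children => runB fuel plist (children ++ rest) visited

def isLinkedbyParse_alt (v1 : String) (v2 : String) (word_props : List (String × List String)) (equalities : List (String × String)) (been : List (String × String)) : Int :=
  let visited := PySem.Set.ofList been
  if PySem.Set.contains visited (v1, v2) then 0
  else
    let plist := word_props.map preB
    match scanB v1 v2 plist [] with
    | none => 2
    | some root =>
      let visited := PySem.Set.add (PySem.Set.add visited (v1, v2)) (v2, v1)
      let S := word_props.foldl (fun n p => n + p.2.length) 0
      runB (root.length + (S + 3) * (S + 3) * (3 * word_props.length + 1) + 1) plist root visited

-- ===== PRECONDITION & SPEC =====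
def Spec_isLinkedbyParse (v1 : String) (v2 : String) (word_props : List (String × List String)) (equalities : List (String × String)) (been : List (String × String)) (out : Int) : Prop := out = isLinkedbyParse_alt v1 v2 word_props equalities been
instance (v1 : String) (v2 : String) (word_props : List (String × List String)) (equalities : List (String × String)) (been : List (String × String)) (out : Int) : Decidable (Spec_isLinkedbyParse v1 v2 word_props equalities been out) := by unfold Spec_isLinkedbyParse; infer_instance

-- ===== CLAIM (what is proved, stated in full; the proofs are below) =====
def Claim_equal_isLinkedbyParse : Prop := ∀ (v1 : String) (v2 : String) (word_props : List (String × List String)) (equalities : List (String × String)) (been : List (String × String)), Dom_isLinkedbyParse v1 v2 word_props equalities been → Spec_isLinkedbyParse v1 v2 word_props equalities been (isLinkedbyParse v1 v2 word_props equalities been)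

-- ===== LEMMAS AND PROOFS =====

-- the word universe every pair reached by the search lives in
def pvInv (W : List String) (props : List (String × List String)) : Prop :=
  "" ∈ W ∧ ∀ pr ∈ props, ∀ w ∈ pr.2, w ∈ W

-- termination measure: number of distinct W×W pairs not yet in `been`
def pvMu (W : List String) (been : List (String × String)) : Nat :=
  (PySem.List.dedup (W ×ˢ W)).countP (fun p => !been.contains p)

theorem pvGetD_mem_cons (l : List String) (j : Nat) : l.getD j "" ∈ "" :: l := by
  induction l generalizing j with
  | nil => simp [List.getD]
  | cons a t ih =>
    cases j with
    | zero => simp [List.getD]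
    | succ j =>
      have := ih j
      simp only [List.getD_cons_succ]
      rcases List.mem_cons.mp this with h | h
      · exact List.mem_cons.mpr (Or.inl h)
      · exact List.mem_cons.mpr (Or.inr (List.mem_cons_of_mem _ h))

theorem callsA_len (a b : String) (args : List String) : (callsA a b args).length ≤ 3 := by
  unfold callsA
  repeat' split
  all_goals simp

theorem callsA_mem {W : List String} {a b : String} {args : List String}
    (hW : "" ∈ W) (hargs : ∀ w ∈ args, w ∈ W) (ha : a ∈ W) (hb : b ∈ W) :
    ∀ pr ∈ callsA a b args, pr.1 ∈ W ∧ pr.2 ∈ W := by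
  have hg : ∀ j : Nat, (args[j]?.getD "") ∈ W := by
    intro j
    have h := pvGetD_mem_cons args j
    rw [List.getD_eq_getElem?_getD] at h
    rcases List.mem_cons.mp h with h | h
    · rw [h]; exact hW
    · exact hargs _ h
  intro pr hpr
  unfold callsA at hpr
  repeat' split at hpr
  all_goals (try (exact absurd hpr List.not_mem_nil))
  all_goals
    (fin_cases hpr <;>
      first
      | exact ⟨hg 0, hb⟩ | exact ⟨hg 1, hb⟩ | exact ⟨hg 2, hb⟩ | exact ⟨hg 3, hb⟩
      | exact ⟨hg 0, ha⟩ | exact ⟨hg 1, ha⟩ | exact ⟨hg 2, ha⟩ | exact ⟨hg 3, ha⟩)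

theorem grow_all (fuel : Nat) :
    (∀ v1 v2 props been, been <+: (goA fuel v1 v2 props been).2) ∧
    (∀ v1 v2 props rem been, been <+: (loopA fuel v1 v2 props rem been).2) ∧
    (∀ props calls been, been <+: (seqA fuel props calls been).2) := by
  induction fuel using Nat.strong_induction_on with
  | _ fuel IH =>
    have hgo : ∀ v1 v2 props been, been <+: (goA fuel v1 v2 props been).2 := by
      intro v1 v2 props been
      match fuel with
      | 0 => simp [goA]
      | f + 1 =>
        rw [goA]
        split
        · exact List.prefix_rfl
        · split
          · exact List.prefix_append _ _
          · exact (List.prefix_append _ _).trans ((IH f (by omega)).2.1 _ _ _ _ _)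
    have hseq : ∀ props calls been, been <+: (seqA fuel props calls been).2 := by
      intro props calls
      induction calls with
      | nil => intro been; simp [seqA]
      | cons p rest ih =>
        intro been
        obtain ⟨a, b⟩ := p
        rw [seqA]
        have h1 := hgo a b props been
        rcases h : goA fuel a b props been with ⟨r, b'⟩
        rw [h] at h1
        simp only
        split
        · exact h1
        · exact h1.trans (ih b')
    have hloop : ∀ v1 v2 props rem been, been <+: (loopA fuel v1 v2 props rem been).2 := by
      intro v1 v2 props rem
      induction rem with
      | nil => intro been; simp [loopA]
      | cons p rest ih =>
        intro been
        rw [loopA]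
        have h1 := hseq props (callsA v1 v2 p.2) been
        rcases h : seqA fuel props (callsA v1 v2 p.2) been with ⟨r, b'⟩
        rw [h] at h1
        simp only
        split
        · exact h1
        · exact h1.trans (ih b')
    exact ⟨hgo, hloop, hseq⟩

theorem pvCountP_lt {α : Type} {l : List α} {p q : α → Bool}
    (himp : ∀ x ∈ l, q x = true → p x = true) {a : α} (ha : a ∈ l)
    (hpa : p a = true) (hqa : ¬ q a = true) : l.countP q < l.countP p := by
  induction l with
  | nil => simp at ha
  | cons b t ih =>
    rcases List.mem_cons.mp ha with rfl | hat
    · have h1 : t.countP q ≤ t.countP p :=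
        List.countP_mono_left (fun x hx => himp x (List.mem_cons_of_mem _ hx))
      simp only [List.countP_cons, hpa, hqa]
      simp
      omega
    · have h1 := ih (fun x hx => himp x (List.mem_cons_of_mem _ hx)) hat
      simp only [List.countP_cons]
      rcases hq : q b with _ | _ <;> rcases hp : p b with _ | _ <;> simp <;> try omega
      · exact absurd (himp b List.mem_cons_self hq) (by simp [hp])

theorem pvMu_mono {W : List String} {b1 b2 : List (String × String)}
    (h : ∀ x, x ∈ b1 → x ∈ b2) : pvMu W b2 ≤ pvMu W b1 := by
  unfold pvMu
  apply List.countP_mono_left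
  intro a _ ha
  simp only [Bool.not_eq_true', List.contains_eq_mem, decide_eq_false_iff_not] at ha ⊢
  exact fun hb => ha (h a hb)

theorem pvMu_dec {W : List String} {v1 v2 : String} {been : List (String × String)}
    (h1 : v1 ∈ W) (h2 : v2 ∈ W) (h : (v1, v2) ∉ been) :
    pvMu W (been ++ [(v1, v2), (v2, v1)]) < pvMu W been := by
  unfold pvMu
  apply pvCountP_lt (a := (v1, v2))
  · intro x _ hx
    simp only [Bool.not_eq_true', List.contains_eq_mem, decide_eq_false_iff_not,
      List.mem_append] at hx ⊢
    exact fun hb => hx (Or.inl hb)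
  · rw [PySem.List.mem_dedup]
    exact List.pair_mem_product.mpr ⟨h1, h2⟩
  · simpa using h
  · simp

theorem seqA_val (fuel : Nat) (props : List (String × List String)) (calls : List (String × String)) (been : List (String × String)) :
    (seqA fuel props calls been).1 = 0 ∨ (seqA fuel props calls been).1 = 1 := by
  induction calls generalizing been with
  | nil => simp [seqA]
  | cons p rest ih =>
    obtain ⟨a, b⟩ := p
    rw [seqA]
    rcases h : goA fuel a b props been with ⟨r, b'⟩
    simp only
    split
    · right; rfl
    · exact ih b'

theorem seqA_append (fuel : Nat) (props : List (String × List String)) (xs ys : List (String × String)) (been : List (String × String)) :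
    seqA fuel props (xs ++ ys) been =
      match seqA fuel props xs been with
      | (r, b') => if r > 0 then (r, b') else seqA fuel props ys b' := by
  induction xs generalizing been with
  | nil => simp [seqA]
  | cons p rest ih =>
    obtain ⟨a, b⟩ := p
    rw [List.cons_append, seqA, seqA]
    rcases h : goA fuel a b props been with ⟨r, b'⟩
    simp only
    split
    · next hr => simp
    · exact ih b'

theorem loopA_eq_seqA (fuel : Nat) (v1 v2 : String) (props rem : List (String × List String)) (been : List (String × String)) :
    loopA fuel v1 v2 props rem been = seqA fuel props (rem.flatMap (fun pr => callsA v1 v2 pr.2)) been := by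
  induction rem generalizing been with
  | nil => simp [loopA, seqA]
  | cons p rest ih =>
    rw [loopA, List.flatMap_cons, seqA_append]
    rcases h : seqA fuel props (callsA v1 v2 p.2) been with ⟨r, b'⟩
    have hv := seqA_val fuel props (callsA v1 v2 p.2) been
    rw [h] at hv
    simp only
    split
    · next hr =>
      rcases hv with hv | hv <;> simp at hv ⊢ <;> omega
    · exact ih b'

theorem seqA_stab {W : List String} {props : List (String × List String)} (n : Nat)
    (hgo : ∀ f g v1 v2 been, v1 ∈ W → v2 ∈ W → pvMu W been ≤ n → n < f → n < g →
      goA f v1 v2 props been = goA g v1 v2 props been) :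
    ∀ calls f g been, (∀ pr ∈ calls, pr.1 ∈ W ∧ pr.2 ∈ W) → pvMu W been ≤ n → n < f → n < g →
      seqA f props calls been = seqA g props calls been := by
  intro calls
  induction calls with
  | nil => intro f g been _ _ _ _; simp [seqA]
  | cons p rest ih =>
    intro f g been hc hμ hf hg
    obtain ⟨a, b⟩ := p
    obtain ⟨ha, hb⟩ := hc (a, b) List.mem_cons_self
    rw [seqA, seqA, hgo f g a b been ha hb hμ hf hg]
    rcases h : goA g a b props been with ⟨r, b'⟩
    have hpre := (grow_all g).1 a b props been
    rw [h] at hpre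
    simp only
    split
    · rfl
    · exact ih f g b' (fun pr hpr => hc pr (List.mem_cons_of_mem _ hpr))
        (le_trans (pvMu_mono (fun x hx => hpre.subset hx)) hμ) hf hg

theorem goA_stab {W : List String} {props : List (String × List String)} (hInv : pvInv W props) :
    ∀ n f g v1 v2 been, v1 ∈ W → v2 ∈ W → pvMu W been ≤ n → n < f → n < g →
      goA f v1 v2 props been = goA g v1 v2 props been := by
  intro n
  induction n using Nat.strong_induction_on with
  | _ n IH =>
    intro f g v1 v2 been h1 h2 hμ hf hg
    obtain ⟨f', rfl⟩ : ∃ f', f = f' + 1 := ⟨f - 1, by omega⟩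
    obtain ⟨g', rfl⟩ : ∃ g', g = g' + 1 := ⟨g - 1, by omega⟩
    rw [goA, goA]
    split
    · rfl
    · next hnb =>
      split
      · rfl
      · have hdec := pvMu_dec h1 h2 hnb
        have hn1 : 1 ≤ n := by omega
        have hμ1 : pvMu W (been ++ [(v1, v2), (v2, v1)]) ≤ n - 1 := by omega
        rw [loopA_eq_seqA, loopA_eq_seqA]
        apply seqA_stab (n - 1) (fun f g a b bn => IH (n - 1) (by omega) f g a b bn)
        · intro pr hpr
          rcases List.mem_flatMap.mp hpr with ⟨q, hq, hpr⟩
          exact callsA_mem hInv.1 (hInv.2 q hq) h1 h2 pr hpr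
        · exact hμ1
        · omega
        · omega

theorem pvIndexTake (l : List String) (n : Nat) (x : String) (h : x ∈ l.take n) :
    PySem.List.index? l x = PySem.List.index? (l.take n) x := by
  induction l generalizing n with
  | nil => simp at h
  | cons a t ih =>
    cases n with
    | zero => simp at h
    | succ n =>
      simp only [List.take_succ_cons] at h ⊢
      by_cases hax : a = x
      · subst hax
        rw [PySem.List.index?_cons_self, PySem.List.index?_cons_self]
      · rcases List.mem_cons.mp h with rfl | h
        · exact absurd rfl hax
        · rw [PySem.List.index?_cons_of_ne t hax, PySem.List.index?_cons_of_ne (t.take n) hax,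
            ih n h]

theorem pvIndexNotTake (l : List String) (n : Nat) (x : String) (i : Nat)
    (hnt : x ∉ l.take n) (hi : PySem.List.index? l x = some i) : n ≤ i := by
  induction l generalizing n i with
  | nil => simp [PySem.List.index?_eq_idxOf?, List.idxOf?] at hi
  | cons a t ih =>
    cases n with
    | zero => omega
    | succ n =>
      simp only [List.take_succ_cons, List.mem_cons, not_or] at hnt
      obtain ⟨hax, hnt⟩ := hnt
      rw [PySem.List.index?_cons_of_ne t (Ne.symm hax)] at hi
      rcases Option.map_eq_some_iff.mp hi with ⟨j, hj, rfl⟩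
      have := ih n j hnt hj
      omega

theorem pvIndexLtLen {l : List String} {x : String} {i : Nat}
    (hi : PySem.List.index? l x = some i) : i < l.length := by
  obtain ⟨hk, _, _⟩ := PySem.List.getElem_of_index?_eq_some hi
  exact hk

-- B's per-prop children (the member side) equal A's per-prop call list
theorem pvSideEq (x other : String) (args : List String) (hx : x ∈ args) :
    (if decide (2 < args.length) && (args.take 4).contains x then
        match PySem.List.index? (args.take 4) x with
        | some i => slotPairs i (args.take 4) other
        | none => []
      else []) =
    (if 2 < args.length then
        match PySem.List.index? args x with
        | some 0 => [(args.getD 1 "", other), (args.getD 2 "", other)] ++ (if 3 < args.length then [(args.getD 3 "", other)] else [])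
        | some 1 => [(args.getD 0 "", other), (args.getD 2 "", other)] ++ (if 3 < args.length then [(args.getD 3 "", other)] else [])
        | some 2 => [(args.getD 0 "", other), (args.getD 1 "", other)] ++ (if 3 < args.length then [(args.getD 3 "", other)] else [])
        | some 3 => [(args.getD 0 "", other), (args.getD 1 "", other), (args.getD 2 "", other)]
        | _ => []
      else []) := by
  by_cases hlen : 2 < args.length
  · rw [if_pos hlen]
    by_cases htk : x ∈ args.take 4
    · rw [if_pos (by simp [List.contains_eq_mem, hlen, htk]), pvIndexTake args 4 x htk]
      rcases hidx : PySem.List.index? (args.take 4) x with _ | i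
      · rfl
      · have hlt := pvIndexLtLen hidx
        rw [List.length_take] at hlt
        rcases args with _ | ⟨a0, args⟩; · simp at hlen
        rcases args with _ | ⟨a1, args⟩; · simp at hlen
        rcases args with _ | ⟨a2, rest⟩; · simp at hlen
        cases rest with
        | nil =>
          have hi3 : i < 3 := by simpa using hlt
          interval_cases i <;> simp [slotPairs, List.range_succ, List.getD]
        | cons a3 t =>
          have hi4 : i < 4 := by omega
          interval_cases i <;> simp [slotPairs, List.range_succ, List.getD]
    · rw [if_neg (by simp [List.contains_eq_mem, htk])]
      rcases hidx : PySem.List.index? args x with _ | i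
      · rfl
      · have h4 : 4 ≤ i := pvIndexNotTake args 4 x i htk hidx
        match i, h4 with
        | i + 4, _ => rfl
  · rw [if_neg (by simp [hlen]), if_neg hlen]

theorem scanB_eq (x y : String) (l : List (String × List String)) (acc : List (String × String)) :
    scanB x y (l.map preB) acc =
      if l.any (fun p => p.2.contains x && p.2.contains y) then none
      else some (acc ++ l.flatMap (fun pr => callsA x y pr.2)) := by
  induction l generalizing acc with
  | nil => simp [scanB]
  | cons p rest ih =>
    obtain ⟨name, args⟩ := p
    rw [List.map_cons,
      show preB (name, args) = (PySem.Set.ofList args, decide (2 < args.length), args.take 4)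
        from rfl,
      scanB]
    by_cases hx : x ∈ args <;> by_cases hy : y ∈ args
    · rw [if_pos (by simp [PySem.Set.mem_ofList, hx]), if_pos (by simp [PySem.Set.mem_ofList, hy]),
        if_pos (by simp only [List.any_cons]; simp [List.contains_eq_mem, hx, hy])]
    · rw [if_pos (by simp [PySem.Set.mem_ofList, hx]),
        if_neg (by simp [PySem.Set.mem_ofList, hy]), ih]
      have hshared : ((args.contains x) && (args.contains y)) = false := by
        simp [List.contains_eq_mem, hy]
      simp only [List.any_cons, hshared, Bool.false_or, List.flatMap_cons]
      have hcalls : callsA x y args =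
          (if decide (2 < args.length) && (args.take 4).contains x then
            match PySem.List.index? (args.take 4) x with
            | some i => slotPairs i (args.take 4) y
            | none => []
          else []) := by
        rw [pvSideEq x y args hx]
        unfold callsA
        rw [if_pos (by simp [List.contains_eq_mem, hx])]
      rw [hcalls]
      split <;> simp
    · rw [if_neg (by simp [PySem.Set.mem_ofList, hx]),
        if_pos (by simp [PySem.Set.mem_ofList, hy]), ih]
      have hshared : ((args.contains x) && (args.contains y)) = false := by
        simp [List.contains_eq_mem, hx]
      simp only [List.any_cons, hshared, Bool.false_or, List.flatMap_cons]
      have hcalls : callsA x y args =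
          (if decide (2 < args.length) && (args.take 4).contains y then
            match PySem.List.index? (args.take 4) y with
            | some i => slotPairs i (args.take 4) x
            | none => []
          else []) := by
        rw [pvSideEq y x args hy]
        unfold callsA
        rw [if_neg (by simp [List.contains_eq_mem, hx]),
          if_pos (by simp [List.contains_eq_mem, hy])]
      rw [hcalls]
      split <;> simp
    · rw [if_neg (by simp [PySem.Set.mem_ofList, hx]),
        if_neg (by simp [PySem.Set.mem_ofList, hy]), ih]
      have hshared : ((args.contains x) && (args.contains y)) = false := by
        simp [List.contains_eq_mem, hx]
      have hcalls : callsA x y args = [] := by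
        unfold callsA
        rw [if_neg (by simp [List.contains_eq_mem, hx]),
          if_neg (by simp [List.contains_eq_mem, hy])]
      simp only [List.any_cons, hshared, Bool.false_or, List.flatMap_cons, hcalls,
        List.nil_append]

theorem pvFlatLen (x y : String) (props : List (String × List String)) :
    (props.flatMap (fun pr => callsA x y pr.2)).length ≤ 3 * props.length := by
  induction props with
  | nil => simp
  | cons p rest ih =>
    simp only [List.flatMap_cons, List.length_append, List.length_cons]
    have := callsA_len x y p.2
    omega

theorem simB {W : List String} {props : List (String × List String)} (hInv : pvInv W props) :
    ∀ mf n pending been visited f,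
      (∀ pr ∈ pending, pr.1 ∈ W ∧ pr.2 ∈ W) →
      (∀ q, PySem.Set.contains visited q = true ↔ q ∈ been) →
      pvMu W been ≤ n → n < f →
      pending.length + n * (3 * props.length + 1) + 1 ≤ mf →
      runB mf (props.map preB) pending visited = (seqA f props pending been).1 := by
  intro mf
  induction mf using Nat.strong_induction_on with
  | _ mf IH =>
    intro n pending been visited f hp hvis hμ hf hmf
    obtain ⟨mf', rfl⟩ : ∃ m, mf = m + 1 := ⟨mf - 1, by omega⟩
    obtain ⟨f', rfl⟩ : ∃ m, f = m + 1 := ⟨f - 1, by omega⟩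
    cases pending with
    | nil => rw [runB, seqA]
    | cons p rest =>
      obtain ⟨px, py⟩ := p
      obtain ⟨hpx, hpy⟩ := hp (px, py) List.mem_cons_self
      dsimp only at hpx hpy
      rw [runB, seqA]
      dsimp only
      by_cases hb : (px, py) ∈ been
      · rw [if_pos ((hvis (px, py)).mpr hb), goA, if_pos hb]
        simp only [gt_iff_lt, lt_self_iff_false, if_false]
        exact IH mf' (by omega) n rest been visited (f' + 1)
          (fun pr hpr => hp pr (List.mem_cons_of_mem _ hpr)) hvis hμ hf
          (by simp at hmf ⊢; omega)
      · have hnv : ¬ (PySem.Set.contains visited (px, py) = true) :=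
          fun h => hb ((hvis _).mp h)
        rw [if_neg hnv, goA, if_neg hb, scanB_eq]
        by_cases hsh : (props.any fun p => p.2.contains px && p.2.contains py) = true
        · rw [if_pos hsh, if_pos hsh]
          norm_num
        · rw [if_neg hsh, if_neg hsh]
          simp only [List.nil_append]
          set been1 := been ++ [(px, py), (py, px)] with hbeen1
          have hdec : pvMu W been1 < pvMu W been := pvMu_dec hpx hpy hb
          have hn1 : 1 ≤ n := by omega
          have hμ1 : pvMu W been1 ≤ n - 1 := by omega
          have hvis1 : ∀ q, PySem.Set.contains
              (PySem.Set.add (PySem.Set.add visited (px, py)) (py, px)) q = true ↔ q ∈ been1 := by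
            intro q
            simp only [PySem.Set.contains_iff, PySem.Set.mem_add, hbeen1, List.mem_append,
              List.mem_cons, List.not_mem_nil, or_false]
            rw [← PySem.Set.contains_iff, hvis q]
            tauto
          set C := props.flatMap (fun pr => callsA px py pr.2) with hC
          have hCmem : ∀ pr ∈ C, pr.1 ∈ W ∧ pr.2 ∈ W := by
            intro pr hpr
            rcases List.mem_flatMap.mp hpr with ⟨q, hq, hpr⟩
            exact callsA_mem hInv.1 (hInv.2 q hq) hpx hpy pr hpr
          have hClen : C.length ≤ 3 * props.length := pvFlatLen px py props
          have harith : (C ++ rest).length + (n - 1) * (3 * props.length + 1) + 1 ≤ mf' := by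
            have hK : 3 * props.length + 1 ≤ n * (3 * props.length + 1) :=
              Nat.le_mul_of_pos_left _ (by omega)
            have hsub : (n - 1) * (3 * props.length + 1)
                = n * (3 * props.length + 1) - (3 * props.length + 1) := by
              rw [Nat.sub_mul, one_mul]
            simp only [List.length_append, List.length_cons] at hmf ⊢
            generalize hnk : n * (3 * props.length + 1) = t at *
            omega
          have hrun : runB mf' (props.map preB) (C ++ rest)
              (PySem.Set.add (PySem.Set.add visited (px, py)) (py, px)) =
              (seqA (f' + 1) props (C ++ rest) been1).1 :=
            IH mf' (by omega) (n - 1) (C ++ rest) been1 _ (f' + 1)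
              (fun pr hpr => (List.mem_append.mp hpr).elim (hCmem pr)
                (fun h => hp pr (List.mem_cons_of_mem _ h)))
              hvis1 hμ1 (by omega) harith
          rw [hrun, seqA_append, loopA_eq_seqA, ← hC]
          rw [seqA_stab (W := W) (n - 1)
            (fun fa ga a b bn ha hb' hμ' hfa hga => goA_stab hInv (n - 1) fa ga a b bn ha hb' hμ' hfa hga)
            C (f' + 1) f' been1 hCmem hμ1 (by omega) (by omega)]
          rcases hs : seqA f' props C been1 with ⟨r, b'⟩
          have hv := seqA_val f' props C been1
          rw [hs] at hv
          dsimp only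
          split
          · next hr => rcases hv with hv | hv <;> simp only at hv <;> omega
          · rfl

theorem pvSum_aux (props : List (String × List String)) (init : Nat) :
    props.foldl (fun n p => n + p.2.length) init = init + (props.flatMap (fun p => p.2)).length := by
  induction props generalizing init with
  | nil => simp
  | cons p rest ih =>
    simp only [List.foldl_cons, List.flatMap_cons, List.length_append, ih]
    omega

theorem pvAddLen {α : Type} [BEq α] (s : PySem.Set α) (x : α) :
    (PySem.Set.add s x).length ≤ s.length + 1 := by
  unfold PySem.Set.add
  split <;> simp

theorem pvOfListFoldlLen {α : Type} [BEq α] (xs : List α) (init : PySem.Set α) :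
    (xs.foldl PySem.Set.add init).length ≤ init.length + xs.length := by
  induction xs generalizing init with
  | nil => simp
  | cons a t ih =>
    simp only [List.foldl_cons, List.length_cons]
    have h1 := pvAddLen init a
    have h2 := ih (PySem.Set.add init a)
    omega

theorem pvMu_le (W : List String) (been : List (String × String)) :
    pvMu W been ≤ W.length * W.length := by
  unfold pvMu
  calc (PySem.List.dedup (W ×ˢ W)).countP (fun p => !been.contains p)
      ≤ (PySem.List.dedup (W ×ˢ W)).length := List.countP_le_length
    _ ≤ (W ×ˢ W).length := by
        rw [PySem.List.dedup_eq_ofList, PySem.Set.ofList_eq_foldl]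
        simpa using pvOfListFoldlLen (W ×ˢ W) []
    _ = W.length * W.length := by simp [List.length_product]

-- ===== VERDICT (by name: the statement is the Claim_ definition above) =====
theorem isLinkedbyParse_spec : Claim_equal_isLinkedbyParse := by
  unfold Claim_equal_isLinkedbyParse Spec_isLinkedbyParse
  intro v1 v2 props eqs been _
  unfold isLinkedbyParse isLinkedbyParse_alt
  dsimp only
  set W : List String := "" :: v1 :: v2 :: props.flatMap (fun p => p.2) with hW
  have hInv : pvInv W props := by
    constructor
    · simp [hW]
    · intro pr hpr w hw
      simp only [hW, List.mem_cons]
      exact Or.inr (Or.inr (Or.inr (List.mem_flatMap.mpr ⟨pr, hpr, hw⟩)))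
  have hv1 : v1 ∈ W := by simp [hW]
  have hv2 : v2 ∈ W := by simp [hW]
  set S := props.foldl (fun n p => n + p.2.length) 0 with hS
  have hWlen : W.length = S + 3 := by
    simp only [hW, List.length_cons, hS, pvSum_aux props 0]
    omega
  by_cases hb : (v1, v2) ∈ been
  · rw [if_pos (by simp [PySem.Set.mem_ofList, hb])]
    rw [goA, if_pos hb]
  · rw [if_neg (by simp [PySem.Set.mem_ofList, hb])]
    rw [goA, if_neg hb, scanB_eq]
    set been1 := been ++ [(v1, v2), (v2, v1)] with hbeen1
    by_cases hsh : (props.any fun p => p.2.contains v1 && p.2.contains v2) = true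
    · rw [if_pos hsh, if_pos hsh]
    · rw [if_neg hsh, if_neg hsh]
      simp only [List.nil_append]
      set C := props.flatMap (fun pr => callsA v1 v2 pr.2) with hC
      have hdec : pvMu W been1 < pvMu W been := pvMu_dec hv1 hv2 hb
      have hmule : pvMu W been ≤ (S + 3) * (S + 3) := by
        have := pvMu_le W been
        rwa [hWlen] at this
      rw [loopA_eq_seqA, ← hC]
      try dsimp only
      rw [simB hInv (C.length + (S + 3) * (S + 3) * (3 * props.length + 1) + 1)
        (pvMu W been1) C been1 _ ((S + 3) * (S + 3) + 1)
        (by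
          intro pr hpr
          rcases List.mem_flatMap.mp hpr with ⟨q, hq, hpr⟩
          exact callsA_mem hInv.1 (hInv.2 q hq) hv1 hv2 pr hpr)
        (by
          intro q
          simp only [PySem.Set.contains_iff, PySem.Set.mem_add, PySem.Set.mem_ofList, hbeen1,
            List.mem_append, List.mem_cons, List.not_mem_nil, or_false]
          tauto)
        le_rfl
        (by omega)
        (by
          have hle : pvMu W been1 ≤ (S + 3) * (S + 3) := by omega
          have := Nat.mul_le_mul_right (3 * props.length + 1) hle
          omega)]
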